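-- pv_equiv track=rewrite | github.com/ICC3103-202110/laboratorio-01-DaniEscanella | Lab_1.py | generar_matrices
-- ===== SOURCE A (Python) =====
-- def generar_matrices(cartas,mazo):
--     if (cartas)>10:
--         columns=10
--         cant_lines=cartas//10
--         if (cartas%10)!=0:
--             cant_lines+=1
--     else:
--         columns=cartas//2
--         cant_lines=2
--     mazo_final=[]
--     for j in range(cant_lines):
--         one=[]
--         for i in range(columns):
--             if len(mazo)!=0:
--                 one.append(mazo[0])
--                 mazo.pop(0)
--             else:
--                 one.append(" ")
--         mazo_final.append(one)
--     return mazo_final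
-- ===== SOURCE B (Python) =====
-- def generar_matrices(cartas, mazo):
--     if cartas > 10:
--         columns = 10
--         cant_lines = -(-cartas // 10)  # ceiling division, same as A's quotient+adjust
--     else:
--         columns = cartas // 2
--         cant_lines = 2
--     w = max(columns, 0)
--     total = cant_lines * w
--     flat = mazo[:total]
--     del mazo[:total]
--     flat += [" "] * (total - len(flat))
--     return [flat[r * w:(r + 1) * w] for r in range(cant_lines)]
-- ===== Notes on version B (the rewrite author's own statement) =====
-- stated objective: faster
-- what changed: Replaces the nested per-cell loop with repeated mazo.pop(0) by one front slice of mazo, one padding extension, and a reshape comprehension of row slices; the mutation of mazo is done in one del mazo[:total].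
import Mathlib
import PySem

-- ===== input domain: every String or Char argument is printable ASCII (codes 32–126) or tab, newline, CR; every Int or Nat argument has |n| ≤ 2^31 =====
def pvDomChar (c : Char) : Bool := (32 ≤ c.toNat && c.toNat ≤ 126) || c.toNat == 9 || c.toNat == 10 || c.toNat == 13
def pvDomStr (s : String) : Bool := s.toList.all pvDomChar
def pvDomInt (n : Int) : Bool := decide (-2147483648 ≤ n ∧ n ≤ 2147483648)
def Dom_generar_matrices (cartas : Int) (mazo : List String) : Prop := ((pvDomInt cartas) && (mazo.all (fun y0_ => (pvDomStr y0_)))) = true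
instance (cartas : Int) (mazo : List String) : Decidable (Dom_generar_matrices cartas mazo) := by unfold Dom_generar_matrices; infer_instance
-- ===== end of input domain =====

-- B builds the result by slicing/padding/reshaping the front of the deck instead of A's
-- nested per-cell pop(0) loop (objective: faster, measured). Both Pythons mutate `mazo`
-- identically (del mazo[:total] vs repeated pop(0)); the equivalence proved here is about
-- the RETURN value only.

-- ===== PORT A =====
def generar_matrices (cartas : Int) (mazo : List String) : List (List String) :=
  let cc : Int × Int :=
    if cartas > 10 then
      let cl := PySem.Int.floordiv cartas 10
      (10, if PySem.Int.mod cartas 10 ≠ 0 then cl + 1 else cl)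
    else
      (PySem.Int.floordiv cartas 2, 2)
  let columns := cc.1
  let cant_lines := cc.2
  -- for j in range(cant_lines): … for i in range(columns): pop/append
  ((PySem.List.pyRange 0 cant_lines 1).foldl
    (fun (st : List String × List (List String)) _ =>
      let inner := (PySem.List.pyRange 0 columns 1).foldl
        (fun (st2 : List String × List String) _ =>
          match st2.1 with
          | [] => (st2.1, st2.2 ++ [" "])          -- len(mazo) == 0: append " "
          | x :: rest => (rest, st2.2 ++ [x]))     -- append mazo[0]; mazo.pop(0)
        (st.1, [])
      (inner.1, st.2 ++ [inner.2]))
    (mazo, [])).2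

-- ===== PORT B =====
def generar_matrices_alt (cartas : Int) (mazo : List String) : List (List String) :=
  let cc : Int × Int :=
    if cartas > 10 then
      (10, -(PySem.Int.floordiv (-cartas) 10))     -- ceiling division
    else
      (PySem.Int.floordiv cartas 2, 2)
  let columns := cc.1
  let cant_lines := cc.2
  let w := max columns 0
  let total := cant_lines * w
  let flat0 := PySem.List.slice mazo none (some total)          -- mazo[:total]
  let flat := flat0 ++ List.replicate (total - (flat0.length : Int)).toNat " "
  (PySem.List.pyRange 0 cant_lines 1).map (fun r =>
    PySem.List.slice flat (some (r * w)) (some ((r + 1) * w)))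

-- ===== PRECONDITION & SPEC =====
def Spec_generar_matrices (cartas : Int) (mazo : List String) (out : List (List String)) : Prop := out = generar_matrices_alt cartas mazo
instance (cartas : Int) (mazo : List String) (out : List (List String)) : Decidable (Spec_generar_matrices cartas mazo out) := by unfold Spec_generar_matrices; infer_instance

-- ===== CLAIM (what is proved, stated in full; the proofs are below) =====
def Claim_equal_generar_matrices : Prop := ∀ (cartas : Int) (mazo : List String), Dom_generar_matrices cartas mazo → Spec_generar_matrices cartas mazo (generar_matrices cartas mazo)

-- ===== LEMMAS AND PROOFS =====

theorem pv_pyRange_zero_eq (b : Int) :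
    PySem.List.pyRange 0 b 1 = List.map (fun (k : Nat) => (k : Int)) (List.range b.toNat) := by
  by_cases h : 0 ≤ b
  · have hb : b = (b.toNat : Int) := by omega
    conv_lhs => rw [hb]
    rw [PySem.List.pyRange_zero_natCast]
  · have : b.toNat = 0 := by omega
    rw [this]
    simp [PySem.List.pyRange]
    omega

theorem pv_inner (l : List Int) (mz one : List String) :
    l.foldl (fun (st2 : List String × List String) _ =>
        match st2.1 with
        | [] => (st2.1, st2.2 ++ [" "])
        | x :: rest => (rest, st2.2 ++ [x])) (mz, one)
      = (mz.drop l.length, one ++ (mz.take l.length ++ List.replicate (l.length - mz.length) " ")) := by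
  induction l generalizing mz one with
  | nil => simp
  | cons a t ih =>
    cases mz with
    | nil =>
      simp only [List.foldl_cons]
      rw [ih]
      simp [List.replicate_succ]
    | cons x rest =>
      simp only [List.foldl_cons]
      rw [ih]
      simp

def pvPad (mz : List String) (n : Nat) : List String :=
  mz.take n ++ List.replicate (n - mz.length) " "

def pvRows (W : Nat) : Nat → List String → List (List String)
  | 0, _ => []
  | n + 1, mz => pvPad mz W :: pvRows W n (mz.drop W)

theorem pv_outer (L : List Int) (columns : Int) (mz : List String) (acc : List (List String)) :
    (L.foldl (fun (st : List String × List (List String)) _ =>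
        let inner := (PySem.List.pyRange 0 columns 1).foldl
          (fun (st2 : List String × List String) _ =>
            match st2.1 with
            | [] => (st2.1, st2.2 ++ [" "])
            | x :: rest => (rest, st2.2 ++ [x])) (st.1, [])
        (inner.1, st.2 ++ [inner.2])) (mz, acc))
      = (mz.drop (L.length * columns.toNat), acc ++ pvRows columns.toNat L.length mz) := by
  have hlen : (PySem.List.pyRange 0 columns 1).length = columns.toNat := by
    rw [pv_pyRange_zero_eq]; simp
  induction L generalizing mz acc with
  | nil => simp [pvRows]
  | cons a t ih =>
    simp only [List.foldl_cons]
    rw [pv_inner, hlen]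
    rw [ih]
    have hm : (t.length + 1) * columns.toNat = columns.toNat + t.length * columns.toNat := by ring
    simp [pvRows, pvPad, List.drop_drop, List.length_cons, hm, List.append_assoc]

theorem pv_rows_eq_map (W N : Nat) (mz : List String) :
    pvRows W N mz = List.map (fun (i : Nat) => pvPad (mz.drop (i * W)) W) (List.range N) := by
  induction N generalizing mz with
  | zero => simp [pvRows]
  | succ n ih =>
    rw [List.range_succ_eq_map]
    simp only [List.map_cons, List.map_map]
    rw [pvRows, ih]
    simp only [Nat.zero_mul, List.drop_zero]
    congr 1
    apply List.map_congr_left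
    intro i _
    simp [List.drop_drop]
    congr 2
    ring

theorem pv_flat_row (mz : List String) (N W i : Nat) (h : i < N) :
    ((mz.take (N * W) ++ List.replicate (N * W - mz.length) " ").drop (i * W)).take W
      = pvPad (mz.drop (i * W)) W := by
  have hW : i * W + W ≤ N * W := by
    have ht : (i + 1) * W ≤ N * W := Nat.mul_le_mul_right W h
    have he : (i + 1) * W = i * W + W := by ring
    omega
  apply List.ext_getElem
  · simp [pvPad]
    omega
  · intro j h1 h2
    simp only [pvPad, List.length_append, List.length_take, List.length_replicate,
      List.length_drop] at h1 h2
    simp only [pvPad, List.getElem_take, List.getElem_drop, List.getElem_append,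
      List.getElem_replicate, List.length_take, List.length_drop]
    split_ifs <;> first
      | rfl
      | omega

theorem pv_ceil (a : Int) (_ha : 10 < a) :
    (if PySem.Int.mod a 10 ≠ 0 then PySem.Int.floordiv a 10 + 1 else PySem.Int.floordiv a 10)
      = -(PySem.Int.floordiv (-a) 10) := by
  have h10 : (0 : Int) < 10 := by norm_num
  have hq := PySem.Int.floordiv_mul_add_mod a 10
  have h1 := PySem.Int.mod_nonneg a h10
  have h2 := PySem.Int.mod_lt a h10
  rw [eq_comm, PySem.Int.neg_floordiv_neg_eq_iff_of_pos h10]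
  split_ifs with hmod <;> constructor <;> omega

theorem pv_main (columns cant : Int) (hcant : 0 ≤ cant) (mz : List String) :
    ((PySem.List.pyRange 0 cant 1).foldl
      (fun (st : List String × List (List String)) _ =>
        let inner := (PySem.List.pyRange 0 columns 1).foldl
          (fun (st2 : List String × List String) _ =>
            match st2.1 with
            | [] => (st2.1, st2.2 ++ [" "])
            | x :: rest => (rest, st2.2 ++ [x])) (st.1, [])
        (inner.1, st.2 ++ [inner.2])) (mz, [])).2
    = (let w := max columns 0
       let total := cant * w
       let flat0 := PySem.List.slice mz none (some total)
       let flat := flat0 ++ List.replicate (total - (flat0.length : Int)).toNat " "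
       (PySem.List.pyRange 0 cant 1).map (fun r =>
         PySem.List.slice flat (some (r * w)) (some ((r + 1) * w)))) := by
  have hlenN : (PySem.List.pyRange 0 cant 1).length = cant.toNat := by
    rw [pv_pyRange_zero_eq]; simp
  have hL := pv_outer (PySem.List.pyRange 0 cant 1) columns mz []
  rw [hL]
  simp only [hlenN, List.nil_append]
  rw [pv_rows_eq_map]
  -- now the B side
  have hw : max columns 0 = ((columns.toNat : Nat) : Int) := by omega
  have hN : cant = ((cant.toNat : Nat) : Int) := by omega
  simp only [hw]
  rw [hN]
  set W := columns.toNat with hWdef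
  set N := cant.toNat with hNdef
  have htotal : ((N : Int)) * ((W : Int)) = (((N * W : Nat)) : Int) := by push_cast; ring
  rw [htotal, PySem.List.slice_to_natCast]
  have hpad : ((((N * W : Nat)) : Int) - ((List.take (N * W) mz).length : Int)).toNat
      = N * W - mz.length := by
    simp only [List.length_take]
    omega
  rw [hpad]
  rw [pv_pyRange_zero_eq ((N : Nat) : Int)]
  simp only [Int.toNat_natCast, List.map_map]
  apply List.map_congr_left
  intro i hi
  have hiN : i < N := List.mem_range.mp hi
  simp only [Function.comp]
  have e1 : ((i : Int)) * ((W : Int)) = (((i * W : Nat)) : Int) := by push_cast; ring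
  have e2 : (((i : Int)) + 1) * ((W : Int)) = (((i * W : Nat)) : Int) + ((W : Int)) := by push_cast; ring
  rw [e1, e2, PySem.List.slice_natCast_add]
  rw [pv_flat_row mz N W i hiN]

-- ===== VERDICT (by name: the statement is the Claim_ definition above) =====
theorem generar_matrices_spec : Claim_equal_generar_matrices := by
  intro cartas mazo _
  unfold Spec_generar_matrices generar_matrices generar_matrices_alt
  by_cases hc : cartas > 10
  · simp only [if_pos hc]
    have h10 : (0 : Int) < 10 := by norm_num
    have hq := PySem.Int.floordiv_mul_add_mod cartas 10
    have h1 := PySem.Int.mod_nonneg cartas h10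
    have h2 := PySem.Int.mod_lt cartas h10
    have hge : 0 ≤ -(PySem.Int.floordiv (-cartas) 10) := by
      rw [← pv_ceil cartas hc]
      split_ifs <;> omega
    rw [pv_ceil cartas hc]
    exact pv_main 10 (-(PySem.Int.floordiv (-cartas) 10)) hge mazo
  · simp only [if_neg hc]
    exact pv_main (PySem.Int.floordiv cartas 2) 2 (by norm_num) mazo
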